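-- pv_equiv track=rewrite | github.com/ltgoslo/factorizer | factorizer.py | whitespace_split
-- ===== SOURCE A (Python) =====
-- def whitespace_split(line):
--     words = line.split()
--     index = line.index
--     offsets = []
--     append = offsets.append
--     running_offset = 0
--     for word in words:
--         word_offset = index(word, running_offset)
--         running_offset = word_offset + len(word)
--         append((word, word_offset, running_offset))
--
--     return offsets
-- ===== SOURCE B (Python) =====
-- def whitespace_split(line):
--     offsets = []
--     cur = []
--     start = 0
--     for i, ch in enumerate(line):
--         if ch.isspace():
--             if cur:
--                 offsets.append((''.join(cur), start, i))
--                 cur = []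
--         else:
--             if not cur:
--                 start = i
--             cur.append(ch)
--     if cur:
--         offsets.append((''.join(cur), start, len(line)))
--     return offsets
-- ===== Notes on version B (the rewrite author's own statement) =====
-- stated objective: simpler
-- what changed: Replaces split() followed by repeated line.index() substring searches with a single forward scan that tracks the current word and its start offset directly.
import Mathlib
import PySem

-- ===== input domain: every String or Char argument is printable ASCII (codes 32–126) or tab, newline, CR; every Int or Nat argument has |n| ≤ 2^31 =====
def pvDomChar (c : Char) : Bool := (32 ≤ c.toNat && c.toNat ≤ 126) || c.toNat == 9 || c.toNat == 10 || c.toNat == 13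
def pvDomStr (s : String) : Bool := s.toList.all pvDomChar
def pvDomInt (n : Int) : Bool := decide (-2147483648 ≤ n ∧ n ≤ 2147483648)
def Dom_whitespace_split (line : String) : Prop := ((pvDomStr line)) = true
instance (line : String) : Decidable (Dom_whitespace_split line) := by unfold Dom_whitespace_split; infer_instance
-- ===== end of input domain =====

-- B replaces A's split() + repeated line.index() substring searches by a single forward
-- scan that accumulates the current word and its start offset; return values proved equal.

-- ===== PORT A =====
-- A: words = line.split(); for each word: word_offset = line.index(word, running_offset);
-- running_offset = word_offset + len(word); append (word, word_offset, running_offset).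
-- (PySem.Chars.findFrom is s.find(sub, start); str.index differs from find only by raising
-- when the substring is absent, which never happens for a word produced by split().)
def pvAStep (cs : List Char) (st : List (String × Int × Int) × Int) (w : List Char) :
    List (String × Int × Int) × Int :=
  let wordOffset := PySem.Chars.findFrom cs w st.2
  let runningOffset := wordOffset + (w.length : Int)
  (st.1 ++ [(String.ofList w, wordOffset, runningOffset)], runningOffset)

def whitespace_split (line : String) : List (String × Int × Int) :=
  ((PySem.Chars.split₀ line.toList).foldl (pvAStep line.toList) ([], 0)).1

-- ===== PORT B =====
-- B: one forward scan over enumerate(line); state = (offsets, cur word chars, start);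
-- after the loop, flush the pending word with end offset len(line).
def pvBStep (st : List (String × Int × Int) × List Char × Int) (p : Int × Char) :
    List (String × Int × Int) × List Char × Int :=
  let (offsets, cur, start) := st
  let (i, ch) := p
  if PySem.Chars.isspace ch then
    if cur.isEmpty then (offsets, cur, start)
    else (offsets ++ [(String.ofList cur, start, i)], [], start)
  else
    if cur.isEmpty then (offsets, [ch], i)
    else (offsets, cur ++ [ch], start)

def whitespace_split_alt (line : String) : List (String × Int × Int) :=
  let st := (PySem.List.enumerate line.toList 0).foldl pvBStep ([], [], 0)
  if st.2.1.isEmpty then st.1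
  else st.1 ++ [(String.ofList st.2.1, st.2.2, (line.toList.length : Int))]

-- ===== PRECONDITION & SPEC =====
def Spec_whitespace_split (line : String) (out : List (String × Int × Int)) : Prop := out = whitespace_split_alt line
instance (line : String) (out : List (String × Int × Int)) : Decidable (Spec_whitespace_split line out) := by unfold Spec_whitespace_split; infer_instance

-- ===== CLAIM (what is proved, stated in full; the proofs are below) =====
def Claim_equal_whitespace_split : Prop := ∀ (line : String), Dom_whitespace_split line → Spec_whitespace_split line (whitespace_split line)

-- ===== LEMMAS AND PROOFS =====

def pvQ (c : Char) : Bool := !(PySem.Chars.isspace c)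

theorem pv_go_acc (s : List Char) : ∀ (cur : List Char) (acc : List (List Char)),
    PySem.Chars.split₀.go s cur acc = acc.reverse ++ PySem.Chars.split₀.go s cur [] := by
  induction s with
  | nil => intro cur acc; rw [PySem.Chars.split₀.go, PySem.Chars.split₀.go]; by_cases h : cur.isEmpty <;> simp [h]
  | cons c rest ih =>
    intro cur acc
    rw [PySem.Chars.split₀.go, PySem.Chars.split₀.go]
    by_cases hs : PySem.Chars.isspace c
    · by_cases hc : cur.isEmpty
      · simp [hs, hc, ih [] acc]
      · simp only [hs, hc, if_true, if_false, Bool.false_eq_true]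
        rw [ih [] (cur.reverse :: acc), ih [] [cur.reverse]]
        simp
    · simp only [hs, Bool.false_eq_true, if_false]
      exact ih (c :: cur) acc

theorem pv_split₀_nil : PySem.Chars.split₀ [] = [] := by
  rw [PySem.Chars.split₀, PySem.Chars.split₀.go]; simp

theorem pv_split₀_cons_space {c : Char} (h : PySem.Chars.isspace c = true) (rest : List Char) :
    PySem.Chars.split₀ (c :: rest) = PySem.Chars.split₀ rest := by
  rw [PySem.Chars.split₀, PySem.Chars.split₀, PySem.Chars.split₀.go]; simp [h]

theorem pv_go_word (s : List Char) : ∀ (cur : List Char), cur ≠ [] →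
    PySem.Chars.split₀.go s cur [] =
      (cur.reverse ++ s.takeWhile pvQ) :: PySem.Chars.split₀ (s.dropWhile pvQ) := by
  induction s with
  | nil =>
    intro cur hc
    rw [PySem.Chars.split₀.go]
    simp [List.isEmpty_iff, hc, pv_split₀_nil]
  | cons c rest ih =>
    intro cur hc
    rw [PySem.Chars.split₀.go]
    by_cases hs : PySem.Chars.isspace c
    · have hq : pvQ c = false := by simp [pvQ, hs]
      simp only [hs, if_true, List.isEmpty_iff, hc, if_false]
      rw [pv_go_acc rest []]
      have h1 : List.takeWhile pvQ (c :: rest) = [] := by simp [hq]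
      have h2 : List.dropWhile pvQ (c :: rest) = c :: rest := by simp [hq]
      rw [h1, h2, pv_split₀_cons_space hs]
      simp [PySem.Chars.split₀]
    · have hq : pvQ c = true := by simp [pvQ, hs]
      simp only [hs, Bool.false_eq_true, if_false]
      rw [ih (c :: cur) (by simp)]
      simp [hq]

theorem pv_split₀_cons_word {c : Char} (h : ¬ PySem.Chars.isspace c = true) (rest : List Char) :
    PySem.Chars.split₀ (c :: rest) =
      (c :: rest.takeWhile pvQ) :: PySem.Chars.split₀ (rest.dropWhile pvQ) := by
  rw [PySem.Chars.split₀, PySem.Chars.split₀.go]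
  simp only [h, Bool.false_eq_true, if_false]
  rw [pv_go_word rest [c] (by simp)]
  simp

theorem pv_words_spec (n : Nat) : ∀ s : List Char, s.length ≤ n →
    ∀ w ∈ PySem.Chars.split₀ s, ∃ h t, w = h :: t ∧ PySem.Chars.isspace h = false := by
  induction n with
  | zero =>
    intro s hs w hw
    have : s = [] := by cases s <;> simp_all
    subst this; rw [pv_split₀_nil] at hw; simp at hw
  | succ n ih =>
    intro s hs w hw
    cases s with
    | nil => rw [pv_split₀_nil] at hw; simp at hw
    | cons c rest =>
      by_cases hc : PySem.Chars.isspace c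
      · exact ih rest (by simpa using Nat.le_of_succ_le_succ hs) w (by rwa [pv_split₀_cons_space hc] at hw)
      · rw [pv_split₀_cons_word hc] at hw
        rcases List.mem_cons.1 hw with hw' | hw'
        · exact ⟨c, _, hw', by simpa using hc⟩
        · exact ih (rest.dropWhile pvQ) (by have := List.length_dropWhile_le pvQ rest; simp at hs ⊢; omega) w hw'

theorem pv_find_eq (s w : List Char) (j : Nat) (h1 : w <+: s.drop j) (h2 : ∀ i < j, ¬ w <+: s.drop i) :
    PySem.Chars.find s w = (j : Int) := by
  have hinf : w <:+: s := (h1.isInfix).trans (List.drop_suffix j s).isInfix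
  have hnn : 0 ≤ PySem.Chars.find s w := (PySem.Chars.find_nonneg_iff s w).2 hinf
  obtain ⟨hw, hmin⟩ := PySem.Chars.find_spec hnn
  have htri : (PySem.Chars.find s w).toNat = j := by
    rcases Nat.lt_trichotomy (PySem.Chars.find s w).toNat j with h | h | h
    · exact absurd hw (h2 _ h)
    · exact h
    · exact absurd h1 (hmin j h)
  omega

theorem pv_find_prefix_zero (s w : List Char) (h : w <+: s) : PySem.Chars.find s w = 0 := by
  simpa using pv_find_eq s w 0 (by simpa using h) (by omega)

theorem pv_find_cons_shift (c : Char) (rest w : List Char) (hw : ¬ w <+: (c :: rest)) :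
    PySem.Chars.find (c :: rest) w =
      if PySem.Chars.find rest w = -1 then -1 else 1 + PySem.Chars.find rest w := by
  by_cases h : PySem.Chars.find rest w = -1
  · rw [if_pos h]
    rw [PySem.Chars.find_eq_neg_one_iff] at h ⊢
    intro hinf
    rcases List.infix_cons_iff.1 hinf with hp | hi
    · exact hw hp
    · exact h hi
  · rw [if_neg h]
    have hnn : 0 ≤ PySem.Chars.find rest w := by
      have := PySem.Chars.neg_one_le_find rest w; omega
    obtain ⟨hwit, hmin⟩ := PySem.Chars.find_spec hnn
    have := pv_find_eq (c :: rest) w ((PySem.Chars.find rest w).toNat + 1)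
      (by simpa using hwit)
      (by
        intro i hi
        cases i with
        | zero => simpa using hw
        | succ i => intro hp; exact hmin i (by omega) (by simpa using hp))
    rw [this]; omega


def pvTok : List Char → Int → List (String × Int × Int)
  | [], _ => []
  | c :: rest, k =>
    if PySem.Chars.isspace c then pvTok rest (k + 1)
    else
      let t := rest.takeWhile pvQ
      (String.ofList (c :: t), k, k + (1 + t.length : Nat)) ::
        pvTok (rest.dropWhile pvQ) (k + (1 + t.length : Nat))
  termination_by cs _ => cs.length
  decreasing_by
    · simp
    · have := List.length_dropWhile_le pvQ rest
      simp; omega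

theorem pvTok_nil (k : Int) : pvTok [] k = [] := by rw [pvTok]

theorem pvTok_cons_space {c : Char} (h : PySem.Chars.isspace c = true) (rest : List Char) (k : Int) :
    pvTok (c :: rest) k = pvTok rest (k + 1) := by
  rw [pvTok]; simp [h]

theorem pvTok_cons_word {c : Char} (h : ¬ PySem.Chars.isspace c = true) (rest : List Char) (k : Int) :
    pvTok (c :: rest) k =
      (String.ofList (c :: rest.takeWhile pvQ), k, k + ((1 + (rest.takeWhile pvQ).length : Nat) : Int)) ::
        pvTok (rest.dropWhile pvQ) (k + ((1 + (rest.takeWhile pvQ).length : Nat) : Int)) := by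
  rw [pvTok]; simp [h]

theorem pv_A_loop (cs : List Char) (n : Nat) : ∀ (suffix : List Char) (k : Nat)
    (acc : List (String × Int × Int)), suffix.length ≤ n → cs.drop k = suffix → k ≤ cs.length →
    ((PySem.Chars.split₀ suffix).foldl (pvAStep cs) (acc, (k : Int))).1 = acc ++ pvTok suffix k := by
  induction n with
  | zero =>
    intro suffix k acc hn hdrop hk
    have : suffix = [] := by cases suffix <;> simp_all
    subst this
    rw [pv_split₀_nil, pvTok]; simp
  | succ n ih =>
    intro suffix k acc hn hdrop hk
    cases suffix with
    | nil => rw [pv_split₀_nil, pvTok]; simp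
    | cons c rest =>
      have hk' : k < cs.length := by
        by_contra h
        have : cs.drop k = [] := List.drop_eq_nil_of_le (by omega)
        simp_all
      have hdrop' : cs.drop (k + 1) = rest := by
        rw [← List.drop_drop, hdrop]
        rfl
      by_cases hc : PySem.Chars.isspace c
      · -- leading whitespace: same fold result with offset k or k+1
        rw [pv_split₀_cons_space hc, pvTok_cons_space hc]
        have heq : ((PySem.Chars.split₀ rest).foldl (pvAStep cs) (acc, (k : Int))).1 =
            ((PySem.Chars.split₀ rest).foldl (pvAStep cs) (acc, ((k : Int) + 1))).1 := by
          cases hws : PySem.Chars.split₀ rest with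
          | nil => simp
          | cons w ws =>
            obtain ⟨h, t, hw, hh⟩ := pv_words_spec rest.length rest (le_refl _) w (by rw [hws]; simp)
            have hnp : ¬ w <+: (c :: rest) := by
              subst hw
              rintro ⟨t1, he⟩
              simp only [List.cons_append, List.cons.injEq] at he
              rw [he.1] at hh
              simp [hc] at hh
            have hfind : PySem.Chars.find (c :: rest) w =
                if PySem.Chars.find rest w = -1 then -1 else 1 + PySem.Chars.find rest w :=
              pv_find_cons_shift c rest w hnp
            have hoff : PySem.Chars.findFrom cs w (k : Int) =
                PySem.Chars.findFrom cs w ((k : Int) + 1) := by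
              have h1 := PySem.Chars.findFrom_natCast cs w k (by omega)
              have h2 := PySem.Chars.findFrom_natCast cs w (k + 1) (by omega)
              rw [hdrop, hfind] at h1
              rw [hdrop'] at h2
              push_cast at h2
              rw [h1, h2]
              by_cases hm : PySem.Chars.find rest w = -1
              · simp [hm]
              · have hr : -1 ≤ PySem.Chars.find rest w := PySem.Chars.neg_one_le_find rest w
                rw [if_neg (by omega), if_neg hm, if_neg hm]
                ring
            have hstep : pvAStep cs (acc, (k : Int)) w = pvAStep cs (acc, ((k : Int) + 1)) w := by
              simp only [pvAStep, hoff]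
            rw [List.foldl_cons, List.foldl_cons, hstep]
        rw [heq]
        have := ih rest (k + 1) acc (by simp at hn; omega) hdrop' (by omega)
        push_cast at this
        exact this
      · -- a word starts at k
        rw [pv_split₀_cons_word hc, pvTok_cons_word hc]
        set t := rest.takeWhile pvQ with ht
        set rest' := rest.dropWhile pvQ with hrest'
        have hpre : (c :: t) <+: (c :: rest) := List.cons_prefix_cons.2 ⟨rfl, List.takeWhile_prefix pvQ⟩
        have hfind0 : PySem.Chars.find (cs.drop k) (c :: t) = 0 := by
          rw [hdrop]; exact pv_find_prefix_zero _ _ hpre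
        have hff : PySem.Chars.findFrom cs (c :: t) (k : Int) = (k : Int) := by
          rw [PySem.Chars.findFrom_natCast cs (c :: t) k (by omega), hfind0]
          simp
        have hsplit : rest.drop t.length = rest' := by
          conv_lhs => rw [← List.takeWhile_append_dropWhile (p := pvQ) (l := rest)]
          rw [← ht, ← hrest']
          exact List.drop_left
        have hdrop'' : cs.drop (k + 1 + t.length) = rest' := by
          have h1 : cs.drop (k + 1 + t.length) = (cs.drop (k + 1)).drop t.length := by
            rw [List.drop_drop]
          rw [h1, hdrop', hsplit]
        have hklen : k + 1 + t.length ≤ cs.length := by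
          have h2 : t.length ≤ rest.length := (List.takeWhile_prefix pvQ).length_le
          have h3 : rest.length = cs.length - (k + 1) := by rw [← hdrop']; simp
          omega
        rw [List.foldl_cons]
        have hlen2 : (((c :: t).length : Nat) : Int) = ((1 + t.length : Nat) : Int) := by
          push_cast; simp; omega
        have hstep : pvAStep cs (acc, (k : Int)) (c :: t) =
            (acc ++ [(String.ofList (c :: t), (k : Int), (k : Int) + ((1 + t.length : Nat) : Int))],
              (k : Int) + ((1 + t.length : Nat) : Int)) := by
          simp only [pvAStep, hff, hlen2]
        rw [hstep]
        have hcast : (k : Int) + ((1 + t.length : Nat) : Int) = ((k + 1 + t.length : Nat) : Int) := by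
          push_cast; ring
        rw [hcast]
        have hlen : rest'.length ≤ rest.length := by
          rw [hrest']; exact List.length_dropWhile_le pvQ rest
        have := ih rest' (k + 1 + t.length)
          (acc ++ [(String.ofList (c :: t), (k : Int), ((k + 1 + t.length : Nat) : Int))])
          (by simp at hn; omega) hdrop'' hklen
        rw [this, ← hcast]
        simp


theorem pv_B_loop : ∀ (suffix : List Char) (k : Int) (out : List (String × Int × Int))
    (cur : List Char) (start : Int) (e : Int), e = k + suffix.length →
    (let st := (PySem.List.enumerate suffix k).foldl pvBStep (out, cur, start)
     if st.2.1.isEmpty then st.1 else st.1 ++ [(String.ofList st.2.1, st.2.2, e)]) =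
    if cur.isEmpty then out ++ pvTok suffix k
    else out ++ (String.ofList (cur ++ suffix.takeWhile pvQ), start,
          k + ((suffix.takeWhile pvQ).length : Int)) ::
        pvTok (suffix.dropWhile pvQ) (k + ((suffix.takeWhile pvQ).length : Int)) := by
  intro suffix
  induction suffix with
  | nil =>
    intro k out cur start e he
    simp only [PySem.List.enumerate_nil, List.foldl_nil, List.takeWhile_nil, List.dropWhile_nil]
    by_cases hc : cur.isEmpty
    · simp [hc, pvTok_nil]
    · simp only [hc]
      simp at he
      simp [he, pvTok_nil]
  | cons c rest ih =>
    intro k out cur start e he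
    rw [PySem.List.enumerate_cons, List.foldl_cons]
    by_cases hs : PySem.Chars.isspace c
    · have hq : pvQ c = false := by simp [pvQ, hs]
      by_cases hc : cur.isEmpty
      · have hcur : cur = [] := List.isEmpty_iff.1 hc
        simp only [pvBStep, hs, if_true, hc]
        rw [ih (k + 1) out cur start e (by simp at he ⊢; omega)]
        rw [pvTok_cons_space hs]
        simp [hcur]
      · simp only [pvBStep, hs, if_true, hc, Bool.false_eq_true, if_false]
        rw [ih (k + 1) (out ++ [(String.ofList cur, start, k)]) [] start e (by simp at he ⊢; omega)]
        simp only [List.isEmpty_nil, if_true]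
        rw [List.takeWhile_cons_of_neg (by simp [hq]), List.dropWhile_cons_of_neg (by simp [hq])]
        rw [pvTok_cons_space hs]
        simp
    · have hq : pvQ c = true := by simp [pvQ, hs]
      by_cases hc : cur.isEmpty
      · have hcur : cur = [] := List.isEmpty_iff.1 hc
        simp only [pvBStep, hs, Bool.false_eq_true, if_false, hc, if_true]
        rw [ih (k + 1) out [c] k e (by simp at he ⊢; omega)]
        simp only [List.isEmpty_cons, Bool.false_eq_true, if_false]
        rw [pvTok_cons_word hs]
        have harith : k + 1 + ((rest.takeWhile pvQ).length : Int) =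
            k + ((1 + (rest.takeWhile pvQ).length : Nat) : Int) := by push_cast; ring
        rw [harith]
        simp
      · have hcur : cur ≠ [] := by simpa [List.isEmpty_iff] using hc
        simp only [pvBStep, hs, Bool.false_eq_true, if_false, hc]
        rw [ih (k + 1) out (cur ++ [c]) start e (by simp at he ⊢; omega)]
        have hc2 : (cur ++ [c]).isEmpty = false := by simp
        simp only [hc2, Bool.false_eq_true, if_false]
        rw [List.takeWhile_cons_of_pos hq, List.dropWhile_cons_of_pos hq]
        have harith : k + 1 + ((rest.takeWhile pvQ).length : Int) =
            k + (((c :: rest.takeWhile pvQ).length : Nat) : Int) := by simp; ring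
        rw [harith]
        simp

-- ===== VERDICT (by name: the statement is the Claim_ definition above) =====
theorem whitespace_split_spec : Claim_equal_whitespace_split := by
  intro line _
  unfold Spec_whitespace_split whitespace_split whitespace_split_alt
  have hA := pv_A_loop line.toList line.toList.length line.toList 0 [] (le_refl _) (by simp) (by simp)
  have hB := pv_B_loop line.toList 0 [] [] 0 (line.toList.length : Int) (by simp)
  simp only [Nat.cast_zero, List.nil_append] at hA
  simp only [List.isEmpty_nil, if_true, List.nil_append] at hB
  rw [hA, ← hB]
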